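-- pv_equiv track=rewrite | github.com/den-hk555/IT_Step_Repository | Python/List_Rez_file.py | can_be_split
-- ===== SOURCE A (Python) =====
-- def can_be_split(input_list):
--     sum_pos = 0
--     for i in range (len(input_list)):
--         sum_pos = sum_pos + (input_list[i])
--         sum_neg = sum(input_list) - sum_pos
--         if sum_pos == sum_neg:
--             return True
--     return False
-- ===== SOURCE B (Python) =====
-- def can_be_split(input_list):
--     total = sum(input_list)
--     if total % 2 != 0:
--         return False
--     half = total // 2
--     prefixes = []
--     acc = 0
--     for x in input_list:
--         acc += x
--         prefixes.append(acc)
--     return half in set(prefixes)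
-- ===== Notes on version B (the rewrite author's own statement) =====
-- stated objective: faster
-- what changed: B reformulates the split condition arithmetically: it rejects odd totals outright, then builds the list of prefix sums in one staged pass and answers by a hash-set membership test of total//2, instead of A's scan that recomputes sum(input_list) on every iteration and compares prefix to suffix.
import Mathlib
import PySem

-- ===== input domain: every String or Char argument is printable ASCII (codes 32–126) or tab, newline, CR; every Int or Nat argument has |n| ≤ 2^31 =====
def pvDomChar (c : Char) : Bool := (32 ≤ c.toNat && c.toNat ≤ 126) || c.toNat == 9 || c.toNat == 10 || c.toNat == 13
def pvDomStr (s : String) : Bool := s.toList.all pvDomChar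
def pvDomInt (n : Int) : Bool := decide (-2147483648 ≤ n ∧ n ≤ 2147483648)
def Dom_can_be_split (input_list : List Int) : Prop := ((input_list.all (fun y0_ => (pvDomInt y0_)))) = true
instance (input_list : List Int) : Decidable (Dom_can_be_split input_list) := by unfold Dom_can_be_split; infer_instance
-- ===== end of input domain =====

-- B replaces A's prefix-vs-suffix scan (which recomputes sum(input_list) each step) by a parity
-- check on the total plus a set-membership test of total//2 among the staged prefix sums (O(n) vs O(n^2)).

-- ===== PORT A =====
-- loop over i in range(len(input_list)) with state sum_pos; recomputes the full sum each step, as A does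
def canA_go (l : List Int) (i : Nat) (sum_pos : Int) : Bool :=
  if h : i < l.length then
    let sp := sum_pos + l[i]
    let sum_neg := l.sum - sp
    if sp == sum_neg then true else canA_go l (i + 1) sp
  else false
termination_by l.length - i

def can_be_split (input_list : List Int) : Bool := canA_go input_list 0 0

-- ===== PORT B =====
def can_be_split_alt (input_list : List Int) : Bool :=
  let total := input_list.sum
  if PySem.Int.mod total 2 != 0 then false
  else
    let half := PySem.Int.floordiv total 2
    let prefixes := (input_list.foldl
      (fun (p : List Int × Int) x => let acc := p.2 + x; (p.1 ++ [acc], acc)) ([], 0)).1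
    PySem.Set.contains (PySem.Set.ofList prefixes) half

-- ===== PRECONDITION & SPEC =====
def Spec_can_be_split (input_list : List Int) (out : Bool) : Prop := out = can_be_split_alt input_list
instance (input_list : List Int) (out : Bool) : Decidable (Spec_can_be_split input_list out) := by unfold Spec_can_be_split; infer_instance

-- ===== CLAIM =====
def Claim_equal_can_be_split : Prop := ∀ (input_list : List Int), Dom_can_be_split input_list → Spec_can_be_split input_list (can_be_split input_list)

-- ===== LEMMAS AND PROOFS =====
-- prefix sums of the nonempty prefixes of xs, starting from accumulator acc
def prefs (acc : Int) : List Int → List Int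
  | [] => []
  | x :: xs => (acc + x) :: prefs (acc + x) xs

lemma canA_eq_any (rest : List Int) : ∀ (l : List Int) (i : Nat) (sp : Int),
    l.drop i = rest → canA_go l i sp = (prefs sp rest).any (fun q => q == l.sum - q) := by
  induction rest with
  | nil =>
    intro l i sp hdrop
    have hlen : l.length ≤ i := by
      by_contra h
      have := List.drop_eq_nil_iff.mp hdrop
      omega
    rw [canA_go]
    simp [Nat.not_lt.mpr hlen, prefs]
  | cons x xs ih =>
    intro l i sp hdrop
    have hi : i < l.length := by
      by_contra h
      rw [List.drop_eq_nil_iff.mpr (by omega)] at hdrop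
      simp at hdrop
    have hx : l[i] = x := by
      have h0 : 0 < (l.drop i).length := by rw [hdrop]; simp
      have := List.getElem_drop (xs := l) (i := i) (j := 0) (h := h0)
      simp only [hdrop, List.getElem_cons_zero, Nat.add_zero] at this
      exact this.symm
    have hdrop' : l.drop (i + 1) = xs := by
      have h1 : l.drop (i + 1) = (l.drop i).drop 1 := by rw [List.drop_drop]
      rw [h1, hdrop]; simp
    rw [canA_go]
    simp only [hi, dif_pos, hx, prefs, List.any_cons]
    split
    · rename_i hcond
      simp [hcond]
    · rename_i hcond
      have hb : (sp + x == l.sum - (sp + x)) = false := by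
        simpa using hcond
      rw [hb, Bool.false_or]
      exact ih l (i + 1) (sp + x) hdrop'

lemma fold_prefs (xs : List Int) : ∀ (p : List Int) (acc : Int),
    (xs.foldl (fun (p : List Int × Int) x => let acc := p.2 + x; (p.1 ++ [acc], acc)) (p, acc)).1
      = p ++ prefs acc xs := by
  induction xs with
  | nil => intro p acc; simp [prefs]
  | cons x xs ih =>
    intro p acc
    simp only [List.foldl_cons, prefs]
    rw [ih]
    simp

-- ===== VERDICT =====
theorem can_be_split_spec : Claim_equal_can_be_split := by
  intro l _
  unfold Spec_can_be_split can_be_split can_be_split_alt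
  rw [canA_eq_any l l 0 0 (by simp)]
  simp only [fold_prefs l [] 0, List.nil_append]
  set total := l.sum with htot
  rw [PySem.Int.mod_eq_emod_of_pos (show (0:Int) < 2 by omega), PySem.Int.floordiv_eq_ediv_of_pos (show (0:Int) < 2 by omega)]
  by_cases hpar : total % 2 = 0
  · have h2 : 2 * (total / 2) = total := by omega
    rw [if_neg (by simp [hpar])]
    have : ∀ q : Int, (q == total - q) = (q == total / 2) := by
      intro q
      rw [Bool.eq_iff_iff]
      simp only [beq_iff_eq]
      omega
    simp only [this]
    rw [Bool.eq_iff_iff, List.any_eq_true]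
    constructor
    · rintro ⟨q, hq, hqe⟩
      rw [PySem.Set.contains_iff, PySem.Set.mem_ofList]
      have hqe' : q = total / 2 := by simpa using hqe
      exact hqe' ▸ hq
    · intro h
      rw [PySem.Set.contains_iff, PySem.Set.mem_ofList] at h
      exact ⟨total / 2, h, by simp⟩
  · rw [if_pos (by simp [hpar])]
    rw [List.any_eq_false]
    intro q _
    simp only [beq_iff_eq]
    omega
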